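-- pv_equiv track=rewrite | github.com/shan2312/DSA-Python-Solutions | hashing/maximum_length_span.py | get_longest_span_length
-- ===== SOURCE A (Python) =====
-- def get_longest_span_length(array1, array2, n):
--     prefix_sum1 = prefix_sum2 = 0
--     max_length = 0
--     hashmap = {}
--
--     for index in range(n):
--         prefix_sum1 += array1[index]
--         prefix_sum2 += array2[index]
--
--         current_diff = (prefix_sum1 - prefix_sum2)
--         if current_diff == 0:
--             max_length = (index + 1)
--
--         elif current_diff in hashmap:
--             max_length = max(max_length, index - hashmap[current_diff])
--
--         else:
--             hashmap[current_diff] = index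
--
--     return max_length
-- ===== SOURCE B (Python) =====
-- def get_longest_span_length(array1, array2, n):
--     p1 = [0]
--     p2 = [0]
--     for i in range(n):
--         p1.append(p1[-1] + array1[i])
--         p2.append(p2[-1] + array2[i])
--     best = 0
--     for i in range(n):
--         for j in range(i, n):
--             if p1[j + 1] - p1[i] == p2[j + 1] - p2[i]:
--                 best = max(best, j - i + 1)
--     return best
-- ===== Notes on version B (the rewrite author's own statement) =====
-- stated objective: alternative
-- what changed: A's single streaming pass with a hashmap of first-seen prefix-sum differences is replaced by explicitly materialized prefix-sum arrays and a brute-force double loop over all start/end indices of spans.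
import Mathlib
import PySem

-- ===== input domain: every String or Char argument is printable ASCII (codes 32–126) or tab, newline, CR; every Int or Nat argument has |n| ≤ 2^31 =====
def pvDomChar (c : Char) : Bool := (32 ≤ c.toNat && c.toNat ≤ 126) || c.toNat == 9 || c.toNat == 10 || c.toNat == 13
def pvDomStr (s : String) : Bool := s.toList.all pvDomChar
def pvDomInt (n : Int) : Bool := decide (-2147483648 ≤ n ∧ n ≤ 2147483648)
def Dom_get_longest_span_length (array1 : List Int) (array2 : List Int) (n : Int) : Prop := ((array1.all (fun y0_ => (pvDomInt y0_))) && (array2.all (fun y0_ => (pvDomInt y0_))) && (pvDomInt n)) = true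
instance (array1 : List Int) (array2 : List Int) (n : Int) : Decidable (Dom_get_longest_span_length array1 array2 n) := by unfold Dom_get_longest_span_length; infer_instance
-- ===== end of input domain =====

-- B replaces A's streaming hashmap pass by explicit prefix-sum arrays and a
-- brute-force double loop over all spans (alternative algorithm, not faster).


-- ===== PORT A =====
def get_longest_span_length (array1 : List Int) (array2 : List Int) (n : Int) : Int :=
  ((PySem.List.pyRange 0 n 1).foldl
    (fun (st : Int × Int × Int × PySem.Dict Int Int) index =>
      let ps1 := st.1 + PySem.List.pyGetD array1 index 0
      let ps2 := st.2.1 + PySem.List.pyGetD array2 index 0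
      let current_diff := ps1 - ps2
      if current_diff = 0 then (ps1, ps2, index + 1, st.2.2.2)
      else
        match (st.2.2.2).get? current_diff with
        | some p => (ps1, ps2, max st.2.2.1 (index - p), st.2.2.2)
        | none => (ps1, ps2, st.2.2.1, (st.2.2.2).insert current_diff index))
    ((0:Int), (0:Int), (0:Int), (PySem.Dict.empty : PySem.Dict Int Int))).2.2.1

-- ===== PORT B =====
def get_longest_span_length_alt (array1 : List Int) (array2 : List Int) (n : Int) : Int :=
  let ps := (PySem.List.pyRange 0 n 1).foldl
      (fun (pp : List Int × List Int) i =>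
        (pp.1 ++ [PySem.List.pyGetD pp.1 (-1) 0 + PySem.List.pyGetD array1 i 0],
         pp.2 ++ [PySem.List.pyGetD pp.2 (-1) 0 + PySem.List.pyGetD array2 i 0]))
      ([0], [0])
  (PySem.List.pyRange 0 n 1).foldl
    (fun best i =>
      (PySem.List.pyRange i n 1).foldl
        (fun best j =>
          if PySem.List.pyGetD ps.1 (j + 1) 0 - PySem.List.pyGetD ps.1 i 0 =
             PySem.List.pyGetD ps.2 (j + 1) 0 - PySem.List.pyGetD ps.2 i 0
          then max best (j - i + 1) else best)
        best)
    0

-- ===== PRECONDITION & SPEC =====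
-- A raises IndexError when n exceeds the length of either array; Pre_ excludes exactly that.
def Pre_get_longest_span_length (array1 : List Int) (array2 : List Int) (n : Int) : Prop :=
  n ≤ (array1.length : Int) ∧ n ≤ (array2.length : Int)
instance (array1 : List Int) (array2 : List Int) (n : Int) : Decidable (Pre_get_longest_span_length array1 array2 n) := by unfold Pre_get_longest_span_length; infer_instance
def pvWitness_get_longest_span_length : List Int × List Int × Int := ([1, 2], [2, 1], 2)

def Spec_get_longest_span_length (array1 : List Int) (array2 : List Int) (n : Int) (out : Int) : Prop := out = get_longest_span_length_alt array1 array2 n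
instance (array1 : List Int) (array2 : List Int) (n : Int) (out : Int) : Decidable (Spec_get_longest_span_length array1 array2 n out) := by unfold Spec_get_longest_span_length; infer_instance

-- ===== CLAIM (what is proved, stated in full; the proofs are below) =====
def Claim_equal_get_longest_span_length : Prop := ∀ (array1 : List Int) (array2 : List Int) (n : Int), Dom_get_longest_span_length array1 array2 n → Pre_get_longest_span_length array1 array2 n → Spec_get_longest_span_length array1 array2 n (get_longest_span_length array1 array2 n)

-- ===== LEMMAS AND PROOFS =====

-- prefix-sum difference after k elements
def pvD (a b : List Int) (k : Nat) : Int := (a.take k).sum - (b.take k).sum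

-- "equal-sum span": span from i to j (exclusive prefix indices), i < j ≤ N
def pvQ (a b : List Int) (N i j : Nat) : Prop := i < j ∧ j ≤ N ∧ pvD a b i = pvD a b j

-- characterization of a result r as "max of 0 and all span lengths up to N"
def pvMaxChar (a b : List Int) (N : Nat) (r : Int) : Prop :=
  0 ≤ r ∧ (∀ i j, pvQ a b N i j → (j : Int) - i ≤ r) ∧
    (r = 0 ∨ ∃ i j, pvQ a b N i j ∧ r = (j : Int) - i)

theorem pvMaxChar_unique {a b : List Int} {N : Nat} {r s : Int}
    (hr : pvMaxChar a b N r) (hs : pvMaxChar a b N s) : r = s := by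
  obtain ⟨hr0, hrub, hrat⟩ := hr
  obtain ⟨hs0, hsub, hsat⟩ := hs
  apply le_antisymm
  · rcases hrat with h | ⟨i, j, hq, he⟩
    · omega
    · have := hsub i j hq; omega
  · rcases hsat with h | ⟨i, j, hq, he⟩
    · omega
    · have := hrub i j hq; omega

-- ---------- A side ----------

def pvStepA (a b : List Int) (st : Int × Int × Int × PySem.Dict Int Int) (k : Nat) :
    Int × Int × Int × PySem.Dict Int Int :=
  let ps1 := st.1 + PySem.List.pyGetD a (k : Int) 0
  let ps2 := st.2.1 + PySem.List.pyGetD b (k : Int) 0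
  let current_diff := ps1 - ps2
  if current_diff = 0 then (ps1, ps2, (k : Int) + 1, st.2.2.2)
  else
    match (st.2.2.2).get? current_diff with
    | some p => (ps1, ps2, max st.2.2.1 ((k : Int) - p), st.2.2.2)
    | none => (ps1, ps2, st.2.2.1, (st.2.2.2).insert current_diff (k : Int))

def pvStA (a b : List Int) (k : Nat) : Int × Int × Int × PySem.Dict Int Int :=
  (List.range k).foldl (pvStepA a b) (0, 0, 0, PySem.Dict.empty)

-- invariants of A's loop state after k iterations
def pvInvA (a b : List Int) (k : Nat) (st : Int × Int × Int × PySem.Dict Int Int) : Prop :=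
  st.1 = (a.take k).sum ∧ st.2.1 = (b.take k).sum ∧
  (st.2.2.2).get? 0 = none ∧
  (∀ v : Int, v ≠ 0 →
    ((st.2.2.2).get? v = none ∧ ∀ t < k, pvD a b (t + 1) ≠ v) ∨
    (∃ t : Nat, (st.2.2.2).get? v = some (t : Int) ∧ t < k ∧ pvD a b (t + 1) = v ∧
      ∀ t' < t, pvD a b (t' + 1) ≠ v)) ∧
  pvMaxChar a b k st.2.2.1

theorem pvQ_mono {a b : List Int} {N N' i j : Nat} (h : pvQ a b N i j) (hN : N ≤ N') :
    pvQ a b N' i j := ⟨h.1, le_trans h.2.1 hN, h.2.2⟩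

theorem pvD_zero (a b : List Int) : pvD a b 0 = 0 := by simp [pvD]

theorem pvInvA_holds (a b : List Int) (k : Nat)
    (hka : k ≤ a.length) (hkb : k ≤ b.length) : pvInvA a b k (pvStA a b k) := by
  induction k with
  | zero =>
    refine ⟨rfl, rfl, rfl, fun v hv => Or.inl ⟨rfl, by omega⟩, ?_⟩
    exact ⟨le_refl 0, fun i j hq => by obtain ⟨h1, h2, _⟩ := hq; omega, Or.inl rfl⟩
  | succ k ih =>
    have hka' : k ≤ a.length := by omega
    have hkb' : k ≤ b.length := by omega
    obtain ⟨h1, h2, h0, hh, hm0, hub, hat⟩ := ih hka' hkb'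
    have hstep : pvStA a b (k + 1) = pvStepA a b (pvStA a b k) k := by
      simp [pvStA, List.range_succ]
    have hga' : (pvStA a b k).1 + PySem.List.pyGetD a (k : Int) 0 = (a.take (k+1)).sum := by
      have hk : k < a.length := by omega
      have ht : a.take (k+1) = a.take k ++ [a[k]] := by
        rw [List.take_add_one]; simp [List.getElem?_eq_getElem hk]
      rw [h1, PySem.List.pyGetD_natCast, List.getD_eq_getElem a 0 hk, ht, List.sum_append]; simp
    have hgb' : (pvStA a b k).2.1 + PySem.List.pyGetD b (k : Int) 0 = (b.take (k+1)).sum := by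
      have hk : k < b.length := by omega
      have ht : b.take (k+1) = b.take k ++ [b[k]] := by
        rw [List.take_add_one]; simp [List.getElem?_eq_getElem hk]
      rw [h2, PySem.List.pyGetD_natCast, List.getD_eq_getElem b 0 hk, ht, List.sum_append]; simp
    rw [hstep]
    unfold pvStepA
    simp only [hga', hgb']
    rw [show (a.take (k+1)).sum - (b.take (k+1)).sum = pvD a b (k+1) from rfl]
    by_cases hd : pvD a b (k+1) = 0
    · rw [if_pos hd]
      refine ⟨rfl, rfl, h0, ?_, ?_⟩
      · intro v hv
        rcases hh v hv with ⟨hn, hfr⟩ | ⟨t, hgt, htk, hDt, hmin⟩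
        · refine Or.inl ⟨hn, fun t ht => ?_⟩
          rcases Nat.lt_succ_iff_lt_or_eq.mp ht with h | h
          · exact hfr t h
          · subst h; rw [hd]; exact fun he => hv he.symm
        · exact Or.inr ⟨t, hgt, by omega, hDt, hmin⟩
      · show pvMaxChar a b (k+1) ((k : Int) + 1)
        refine ⟨by omega, fun i j hq => ?_,
          Or.inr ⟨0, k+1, ⟨by omega, le_refl _, by rw [pvD_zero, hd]⟩, by push_cast; ring⟩⟩
        obtain ⟨hij, hjk, _⟩ := hq
        omega
    · rw [if_neg hd]
      rcases hget : (pvStA a b k).2.2.2.get? (pvD a b (k+1)) with _ | p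
      · -- value not seen before: insert it
        rcases hh _ hd with ⟨hn, hfr⟩ | ⟨t, hgt, htk, hDt, hmin⟩
        · refine ⟨rfl, rfl, ?_, ?_, ?_⟩
          · show ((pvStA a b k).2.2.2.insert (pvD a b (k+1)) (k : Int)).get? 0 = none
            rw [PySem.Dict.get?_insert_of_ne _ _ (fun he => hd he.symm)]; exact h0
          · intro v hv
            show ((pvStA a b k).2.2.2.insert (pvD a b (k+1)) (k : Int)).get? v = none ∧ _ ∨ _
            by_cases hvd : v = pvD a b (k+1)
            · refine Or.inr ⟨k, ?_, by omega, hvd.symm, ?_⟩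
              · rw [hvd]; exact PySem.Dict.get?_insert_self _ _ _
              · intro t' ht'; rw [hvd]; exact hfr t' ht'
            · rw [PySem.Dict.get?_insert_of_ne _ _ hvd]
              rcases hh v hv with ⟨hn', hfr'⟩ | ⟨t', hgt', htk', hDt', hmin'⟩
              · refine Or.inl ⟨hn', fun t'' ht'' => ?_⟩
                rcases Nat.lt_succ_iff_lt_or_eq.mp ht'' with h | h
                · exact hfr' t'' h
                · subst h; exact fun he => hvd he.symm
              · exact Or.inr ⟨t', hgt', by omega, hDt', hmin'⟩
          · show pvMaxChar a b (k+1) ((pvStA a b k).2.2.1)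
            refine ⟨hm0, fun i j hq => ?_, ?_⟩
            · obtain ⟨hij, hjk1, hDij⟩ := hq
              by_cases hjk : j ≤ k
              · exact hub i j ⟨hij, hjk, hDij⟩
              · exfalso
                have hj : j = k + 1 := by omega
                subst hj
                rcases Nat.eq_zero_or_pos i with hi | hi
                · subst hi; rw [pvD_zero] at hDij; exact hd hDij.symm
                · have : pvD a b ((i-1)+1) = pvD a b (k+1) := by
                    rw [Nat.sub_add_cancel hi]; exact hDij
                  exact hfr (i-1) (by omega) this
            · rcases hat with h | ⟨i, j, hq, he⟩
              · exact Or.inl h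
              · exact Or.inr ⟨i, j, pvQ_mono hq (by omega), he⟩
        · rw [hget] at hgt; cases hgt
      · -- value seen before at stored index p
        rcases hh _ hd with ⟨hn, hfr⟩ | ⟨t, hgt, htk, hDt, hmin⟩
        · rw [hget] at hn; cases hn
        · rw [hget] at hgt
          injection hgt with hgt
          refine ⟨rfl, rfl, h0, ?_, ?_⟩
          · intro v hv
            rcases hh v hv with ⟨hn', hfr'⟩ | ⟨t', hgt', htk', hDt', hmin'⟩
            · refine Or.inl ⟨hn', fun t'' ht'' => ?_⟩
              rcases Nat.lt_succ_iff_lt_or_eq.mp ht'' with h | h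
              · exact hfr' t'' h
              · subst h
                intro he
                rw [← he] at hn'
                rw [hget] at hn'; cases hn'
            · exact Or.inr ⟨t', hgt', by omega, hDt', hmin'⟩
          · show pvMaxChar a b (k+1) (max ((pvStA a b k).2.2.1) ((k : Int) - p))
            refine ⟨le_trans hm0 (le_max_left _ _), fun i j hq => ?_, ?_⟩
            · obtain ⟨hij, hjk1, hDij⟩ := hq
              by_cases hjk : j ≤ k
              · exact le_trans (hub i j ⟨hij, hjk, hDij⟩) (le_max_left _ _)
              · have hj : j = k + 1 := by omega
                subst hj
                rcases Nat.eq_zero_or_pos i with hi | hi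
                · exfalso; subst hi; rw [pvD_zero] at hDij; exact hd hDij.symm
                · have hDi : pvD a b ((i-1)+1) = pvD a b (k+1) := by
                    rw [Nat.sub_add_cancel hi]; exact hDij
                  have hti : ¬ (i - 1 < t) := fun hlt => hmin (i-1) hlt hDi
                  refine le_trans ?_ (le_max_right _ _)
                  rw [hgt]
                  push_cast
                  omega
            · rcases max_choice ((pvStA a b k).2.2.1) ((k:Int) - p) with h | h
              · rw [h]
                rcases hat with h' | ⟨i, j, hq, he⟩
                · exact Or.inl h'
                · exact Or.inr ⟨i, j, pvQ_mono hq (by omega), he⟩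
              · rw [h]
                exact Or.inr ⟨t+1, k+1, ⟨by omega, le_refl _, hDt⟩, by rw [hgt]; push_cast; ring⟩

-- ---------- A port equals the Nat-indexed loop ----------

theorem portA_eq (a b : List Int) (n : Int) (hn : 0 ≤ n) :
    get_longest_span_length a b n = (pvStA a b n.toNat).2.2.1 := by
  unfold get_longest_span_length pvStA
  rw [show n = ((n.toNat : Nat) : Int) from (Int.toNat_of_nonneg hn).symm]
  rw [PySem.List.pyRange_zero_natCast, List.foldl_map]
  rfl

-- ---------- B side ----------

def pvP (a : List Int) (N : Nat) : List Int := (List.range (N+1)).map (fun k => (a.take k).sum)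

theorem pvP_succ (a : List Int) (N : Nat) : pvP a (N+1) = pvP a N ++ [(a.take (N+1)).sum] := by
  simp [pvP, List.range_succ]

theorem pvP_last (a : List Int) (N : Nat) :
    PySem.List.pyGetD (pvP a N) (-1) 0 = (a.take N).sum := by
  cases N with
  | zero =>
    rw [show pvP a 0 = [] ++ [(a.take 0).sum] by simp [pvP]]
    exact PySem.List.pyGetD_neg_one_append_singleton _ _ _
  | succ M =>
    rw [pvP_succ]
    exact PySem.List.pyGetD_neg_one_append_singleton _ _ _

theorem pvP_get (a : List Int) (N k : Nat) (hk : k ≤ N) :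
    PySem.List.pyGetD (pvP a N) ((k : Nat) : Int) 0 = (a.take k).sum := by
  rw [PySem.List.pyGetD_natCast]
  have hlt : k < (pvP a N).length := by simp [pvP]; omega
  rw [List.getD_eq_getElem _ 0 hlt]
  simp [pvP]

theorem foldPS (a b : List Int) (N : Nat) (hNa : N ≤ a.length) (hNb : N ≤ b.length) :
    (List.range N).foldl (fun (pp : List Int × List Int) (k : Nat) =>
      (pp.1 ++ [PySem.List.pyGetD pp.1 (-1) 0 + PySem.List.pyGetD a ((k : Nat) : Int) 0],
       pp.2 ++ [PySem.List.pyGetD pp.2 (-1) 0 + PySem.List.pyGetD b ((k : Nat) : Int) 0]))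
      ([0], [0]) = (pvP a N, pvP b N) := by
  induction N with
  | zero => simp [pvP]
  | succ M ih =>
    rw [List.range_succ, List.foldl_append, ih (by omega) (by omega)]
    have hka : M < a.length := by omega
    have hkb : M < b.length := by omega
    have ha : PySem.List.pyGetD (pvP a M) (-1) 0 + PySem.List.pyGetD a ((M : Nat) : Int) 0
        = (a.take (M+1)).sum := by
      have ht : a.take (M+1) = a.take M ++ [a[M]] := by
        rw [List.take_add_one]; simp [List.getElem?_eq_getElem hka]
      rw [pvP_last, PySem.List.pyGetD_natCast, List.getD_eq_getElem a 0 hka, ht, List.sum_append]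
      simp
    have hb : PySem.List.pyGetD (pvP b M) (-1) 0 + PySem.List.pyGetD b ((M : Nat) : Int) 0
        = (b.take (M+1)).sum := by
      have ht : b.take (M+1) = b.take M ++ [b[M]] := by
        rw [List.take_add_one]; simp [List.getElem?_eq_getElem hkb]
      rw [pvP_last, PySem.List.pyGetD_natCast, List.getD_eq_getElem b 0 hkb, ht, List.sum_append]
      simp
    show (pvP a M ++ [_], pvP b M ++ [_]) = _
    rw [ha, hb, pvP_succ, pvP_succ]

-- generic facts about a conditional running-max fold
theorem pvFold_ge_init {α : Type} (l : List α) (c : α → Prop) [DecidablePred c]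
    (g : α → Int) (init : Int) :
    init ≤ l.foldl (fun acc x => if c x then max acc (g x) else acc) init := by
  induction l generalizing init with
  | nil => simp
  | cons x l ih =>
    refine le_trans ?_ (ih _)
    dsimp only
    split
    · exact le_max_left _ _
    · exact le_refl _

theorem pvFold_ge {α : Type} (l : List α) (c : α → Prop) [DecidablePred c]
    (g : α → Int) (x : α) (hc : c x) :
    ∀ init : Int, x ∈ l →
      g x ≤ l.foldl (fun acc x => if c x then max acc (g x) else acc) init := by
  induction l with
  | nil => intro init hx; cases hx
  | cons y l ih =>
    intro init hx
    simp only [List.foldl_cons]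
    rcases List.mem_cons.mp hx with rfl | hx'
    · refine le_trans ?_ (pvFold_ge_init l c g _)
      rw [if_pos hc]
      exact le_max_right _ _
    · exact ih _ hx'

theorem pvFold_cases {α : Type} (l : List α) (c : α → Prop) [DecidablePred c]
    (g : α → Int) (init : Int) :
    l.foldl (fun acc x => if c x then max acc (g x) else acc) init = init ∨
      ∃ x ∈ l, c x ∧ l.foldl (fun acc x => if c x then max acc (g x) else acc) init = g x := by
  induction l generalizing init with
  | nil => exact Or.inl rfl
  | cons y l ih =>
    have hcons : (y :: l).foldl (fun acc x => if c x then max acc (g x) else acc) init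
        = l.foldl (fun acc x => if c x then max acc (g x) else acc)
            (if c y then max init (g y) else init) := by
      simp only [List.foldl_cons]
    rw [hcons]
    rcases ih (if c y then max init (g y) else init) with h | ⟨x, hx, hcx, he⟩
    · by_cases hcy : c y
      · rw [if_pos hcy] at h ⊢
        rcases max_choice init (g y) with hm | hm
        · exact Or.inl (h.trans hm)
        · exact Or.inr ⟨y, List.mem_cons_self .., hcy, h.trans hm⟩
      · rw [if_neg hcy] at h ⊢
        exact Or.inl h
    · exact Or.inr ⟨x, List.mem_cons_of_mem _ hx, hcx, he⟩

theorem pvFoldl_flatMap {α β : Type} (l : List α) (g : α → List β)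
    (f : Int → β → Int) (init : Int) :
    l.foldl (fun acc x => (g x).foldl f acc) init = (l.flatMap g).foldl f init := by
  induction l generalizing init with
  | nil => rfl
  | cons x l ih => simp only [List.foldl_cons, List.flatMap_cons, List.foldl_append, ih]

def pvPairs (n : Int) : List (Int × Int) :=
  (PySem.List.pyRange 0 n 1).flatMap (fun i => (PySem.List.pyRange i n 1).map (fun j => (i, j)))

theorem mem_pvPairs {n : Int} {p : Int × Int} :
    p ∈ pvPairs n ↔ 0 ≤ p.1 ∧ p.1 ≤ p.2 ∧ p.2 < n := by
  simp only [pvPairs, List.mem_flatMap, List.mem_map, PySem.List.mem_pyRange_one]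
  constructor
  · rintro ⟨i, ⟨h0, hn⟩, j, ⟨hij, hjn⟩, rfl⟩
    exact ⟨h0, hij, hjn⟩
  · rintro ⟨h0, hij, hjn⟩
    exact ⟨p.1, ⟨h0, by omega⟩, p.2, ⟨hij, hjn⟩, rfl⟩

theorem portB_char (a b : List Int) (n : Int) (hn0 : 0 ≤ n)
    (hNa : n ≤ (a.length : Int)) (hNb : n ≤ (b.length : Int)) :
    pvMaxChar a b n.toNat (get_longest_span_length_alt a b n) := by
  have hnN : n = ((n.toNat : Nat) : Int) := (Int.toNat_of_nonneg hn0).symm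
  have hps : (PySem.List.pyRange 0 n 1).foldl
      (fun (pp : List Int × List Int) i =>
        (pp.1 ++ [PySem.List.pyGetD pp.1 (-1) 0 + PySem.List.pyGetD a i 0],
         pp.2 ++ [PySem.List.pyGetD pp.2 (-1) 0 + PySem.List.pyGetD b i 0]))
      ([0], [0]) = (pvP a n.toNat, pvP b n.toNat) := by
    rw [hnN, PySem.List.pyRange_zero_natCast, List.foldl_map]
    exact foldPS a b n.toNat (by omega) (by omega)
  have halt : get_longest_span_length_alt a b n = (pvPairs n).foldl
      (fun acc p => if PySem.List.pyGetD (pvP a n.toNat) (p.2 + 1) 0 -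
             PySem.List.pyGetD (pvP a n.toNat) p.1 0 =
           PySem.List.pyGetD (pvP b n.toNat) (p.2 + 1) 0 -
             PySem.List.pyGetD (pvP b n.toNat) p.1 0
         then max acc (p.2 - p.1 + 1) else acc) 0 := by
    simp only [get_longest_span_length_alt]
    rw [hps]
    dsimp only
    unfold pvPairs
    rw [← pvFoldl_flatMap]
    exact PySem.List.foldl_congr_mem _ _ _ _ (fun acc i _ => by rw [List.foldl_map])
  rw [halt]
  refine ⟨pvFold_ge_init _ _ _ _, ?_, ?_⟩
  · intro i j hq
    obtain ⟨hij, hjN, hD⟩ := hq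
    have hx : ((i : Int), (j : Int) - 1) ∈ pvPairs n :=
      mem_pvPairs.mpr ⟨by omega, by omega, by omega⟩
    have e1 : ((j : Int) - 1) + 1 = ((j : Nat) : Int) := by ring
    have hc : PySem.List.pyGetD (pvP a n.toNat) (((j:Int) - 1) + 1) 0 -
          PySem.List.pyGetD (pvP a n.toNat) (i : Int) 0 =
        PySem.List.pyGetD (pvP b n.toNat) (((j:Int) - 1) + 1) 0 -
          PySem.List.pyGetD (pvP b n.toNat) (i : Int) 0 := by
      rw [e1, pvP_get a _ j hjN, pvP_get b _ j hjN,
        pvP_get a _ i (by omega), pvP_get b _ i (by omega)]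
      simp only [pvD] at hD
      omega
    have := pvFold_ge (pvPairs n)
        (fun p => PySem.List.pyGetD (pvP a n.toNat) (p.2 + 1) 0 -
             PySem.List.pyGetD (pvP a n.toNat) p.1 0 =
           PySem.List.pyGetD (pvP b n.toNat) (p.2 + 1) 0 -
             PySem.List.pyGetD (pvP b n.toNat) p.1 0)
        (fun p => p.2 - p.1 + 1) ((i : Int), (j : Int) - 1) hc 0 hx
    dsimp only at this
    omega
  · rcases pvFold_cases (pvPairs n)
        (fun p => PySem.List.pyGetD (pvP a n.toNat) (p.2 + 1) 0 -
             PySem.List.pyGetD (pvP a n.toNat) p.1 0 =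
           PySem.List.pyGetD (pvP b n.toNat) (p.2 + 1) 0 -
             PySem.List.pyGetD (pvP b n.toNat) p.1 0)
        (fun p => p.2 - p.1 + 1) 0 with h | ⟨p, hp, hcp, he⟩
    · exact Or.inl h
    · obtain ⟨hp0, hp12, hp2⟩ := mem_pvPairs.mp hp
      refine Or.inr ⟨p.1.toNat, p.2.toNat + 1, ⟨by omega, by omega, ?_⟩, by omega⟩
      have e1 : p.1 = ((p.1.toNat : Nat) : Int) := by omega
      have e2 : p.2 + 1 = ((p.2.toNat + 1 : Nat) : Int) := by push_cast; omega
      rw [e1, e2] at hcp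
      rw [pvP_get a _ _ (by omega), pvP_get b _ _ (by omega),
        pvP_get a _ _ (by omega), pvP_get b _ _ (by omega)] at hcp
      simp only [pvD]
      omega

-- ===== VERDICT (by name: the statement is the Claim_ definition above) =====
theorem get_longest_span_length_spec : Claim_equal_get_longest_span_length := by
  intro a b n _ hpre
  obtain ⟨hna, hnb⟩ := hpre
  unfold Spec_get_longest_span_length
  by_cases hn : n ≤ 0
  · have hr : PySem.List.pyRange 0 n 1 = [] := PySem.List.pyRange_one_eq_nil hn
    unfold get_longest_span_length get_longest_span_length_alt
    rw [hr]
    rfl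
  · have hn0 : 0 ≤ n := by omega
    have hA := pvInvA_holds a b n.toNat (by omega) (by omega)
    have hAc : pvMaxChar a b n.toNat (get_longest_span_length a b n) := by
      rw [portA_eq a b n hn0]; exact hA.2.2.2.2
    exact pvMaxChar_unique hAc (portB_char a b n hn0 hna hnb)
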